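-- pv_equiv track=rewrite | github.com/JonathanGupton/aoc-2024 | aoc/day07.py | count_valid_operator_configurations
-- ===== SOURCE A (Python) =====
-- from typing import Sequence
-- from operator import add
-- from operator import mul
--
-- def count_valid_operator_configurations(
--     equations: list[tuple[int, tuple[int, ...]], ...]
-- ) -> int:
--     def _valid_configuration(
--         target: int, lop: int, rops: Sequence[int], total: int = 0
--     ) -> int:
--         if target == lop and not rops:
--             return 1
--         if lop > target or not rops:
--             return False
--         for op in [add, mul]:
--             new_lop = op(lop, rops[0])
--             new_rops = tuple(rops[1:])
--             total += _valid_configuration(target, new_lop, new_rops)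
--         return total
--
--     total_valid_configurations = 0
--     for eq in equations:
--         target, nums = eq
--         lops, nums = nums[0], tuple(nums[1:])
--         if _valid_configuration(target, lops, nums):
--             total_valid_configurations += target
--         # total_valid_configurations += _valid_configuration(target, lops, nums)
--     return total_valid_configurations
-- ===== SOURCE B (Python) =====
-- def count_valid_operator_configurations(equations):
--     total = 0
--     for target, nums in equations:
--         reach = {nums[0]}
--         for n in nums[1:]:
--             nxt = set()
--             for v in reach:
--                 if v <= target:
--                     nxt.add(v + n)
--                     nxt.add(v * n)
--             reach = nxt
--         if target in reach:
--             total += target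
--     return total
-- ===== Notes on version B (the rewrite author's own statement) =====
-- stated objective: alternative
-- what changed: Replaces A's exponential recursion over all +/* operator sequences (with >target pruning) by a forward set-based reachability DP that keeps the set of DISTINCT reachable partial values, pruning values above the target at each step, and tests whether the target itself is reachable; sharing of duplicate partial values replaces per-sequence counting.
import Mathlib
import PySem

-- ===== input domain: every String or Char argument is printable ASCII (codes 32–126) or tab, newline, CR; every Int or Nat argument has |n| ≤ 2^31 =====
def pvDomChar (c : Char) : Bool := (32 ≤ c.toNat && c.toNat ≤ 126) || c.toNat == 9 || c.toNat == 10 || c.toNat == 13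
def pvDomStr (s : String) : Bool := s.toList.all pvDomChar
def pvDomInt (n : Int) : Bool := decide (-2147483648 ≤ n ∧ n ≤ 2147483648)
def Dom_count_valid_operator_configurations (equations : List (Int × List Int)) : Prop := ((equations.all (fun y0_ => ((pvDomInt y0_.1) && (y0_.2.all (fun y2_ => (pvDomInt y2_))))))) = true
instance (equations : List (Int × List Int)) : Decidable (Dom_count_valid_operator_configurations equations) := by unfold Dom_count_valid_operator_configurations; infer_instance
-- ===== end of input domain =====

-- B replaces A's per-sequence recursion over all +/* operator configurations by a set-based
-- reachability DP over the distinct partial values, with the same >target pruning (alternative algorithm).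


-- ===== PORT A =====
-- _valid_configuration: counts operator sequences; Python's `return False` is 0 in the sum.
def pvValidA (target lop : Int) (rops : List Int) (total : Int) : Int :=
  if target = lop ∧ rops = [] then 1
  else if lop > target ∨ rops = [] then 0
  else match rops with
    | [] => 0  -- unreachable (rops ≠ [] here)
    | r :: rest => total + pvValidA target (lop + r) rest 0 + pvValidA target (lop * r) rest 0
termination_by rops.length

def count_valid_operator_configurations (equations : List (Int × List Int)) : Int :=
  equations.foldl (fun acc eq =>
    match eq.2 with
    | [] => acc  -- Python raises IndexError here; excluded by Pre_
    | h :: rest => if pvValidA eq.1 h rest 0 ≠ 0 then acc + eq.1 else acc) 0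

-- ===== PORT B =====
-- one DP step: from the set of reachable partial values, apply +n and *n to those ≤ target
def pvStep (target n : Int) (reach : PySem.Set Int) : PySem.Set Int :=
  reach.foldl
    (fun nxt v => if v ≤ target then PySem.Set.add (PySem.Set.add nxt (v + n)) (v * n) else nxt)
    PySem.Set.empty

def count_valid_operator_configurations_alt (equations : List (Int × List Int)) : Int :=
  equations.foldl (fun total eq =>
    match eq.2 with
    | [] => total  -- Python raises IndexError here; excluded by Pre_
    | h :: rest =>
      let reach := rest.foldl (fun r n => pvStep eq.1 n r) (PySem.Set.ofList [h])
      if PySem.Set.contains reach eq.1 then total + eq.1 else total) 0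

-- ===== PRECONDITION & SPEC =====
-- Pre_ excludes equations with an empty number list, on which Python's nums[0] raises IndexError (in both A and B).
def Pre_count_valid_operator_configurations (equations : List (Int × List Int)) : Prop :=
  ∀ eq ∈ equations, eq.2 ≠ []
instance (equations : List (Int × List Int)) : Decidable (Pre_count_valid_operator_configurations equations) := by unfold Pre_count_valid_operator_configurations; infer_instance

def pvWitness_count_valid_operator_configurations : (List (Int × List Int)) :=
  [(190, [10, 19]), (3267, [81, 40, 27]), (292, [11, 6, 16, 20])]

def Spec_count_valid_operator_configurations (equations : List (Int × List Int)) (out : Int) : Prop := out = count_valid_operator_configurations_alt equations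
instance (equations : List (Int × List Int)) (out : Int) : Decidable (Spec_count_valid_operator_configurations equations out) := by unfold Spec_count_valid_operator_configurations; infer_instance

-- ===== CLAIM (what is proved, stated in full; the proofs are below) =====
def Claim_equal_count_valid_operator_configurations : Prop := ∀ (equations : List (Int × List Int)), Dom_count_valid_operator_configurations equations → Pre_count_valid_operator_configurations equations → Spec_count_valid_operator_configurations equations (count_valid_operator_configurations equations)

-- ===== LEMMAS AND PROOFS =====

-- reduction lemmas for A's recursion
theorem pvValidA_nil (t l tot : Int) : pvValidA t l [] tot = if t = l then 1 else 0 := by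
  rw [pvValidA.eq_def]; split_ifs <;> simp_all

theorem pvValidA_cons (t l tot r : Int) (rest : List Int) :
    pvValidA t l (r :: rest) tot =
      if l > t then 0 else tot + pvValidA t (l + r) rest 0 + pvValidA t (l * r) rest 0 := by
  rw [pvValidA.eq_def]
  rw [if_neg (by simp : ¬(t = l ∧ r :: rest = []))]
  by_cases h : l > t
  · rw [if_pos (Or.inl h), if_pos h]
  · rw [if_neg (by simp [h]), if_neg h]

-- A's counter is nonnegative
theorem pvValidA_nonneg (target : Int) : ∀ (rops : List Int) (lop : Int),
    0 ≤ pvValidA target lop rops 0 := by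
  intro rops
  induction rops with
  | nil => intro lop; rw [pvValidA_nil]; split_ifs <;> omega
  | cons r rest ih =>
    intro lop
    rw [pvValidA_cons]
    have := ih (lop + r); have := ih (lop * r)
    split_ifs <;> omega

-- membership in pvStep
theorem mem_pvStep (target n w : Int) (s : PySem.Set Int) :
    w ∈ pvStep target n s ↔ ∃ v ∈ s, v ≤ target ∧ (w = v + n ∨ w = v * n) := by
  unfold pvStep
  have key : ∀ (l : List Int) (acc : PySem.Set Int),
      w ∈ l.foldl (fun nxt v => if v ≤ target then PySem.Set.add (PySem.Set.add nxt (v + n)) (v * n) else nxt) acc ↔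
        w ∈ acc ∨ ∃ v ∈ l, v ≤ target ∧ (w = v + n ∨ w = v * n) := by
    intro l
    induction l with
    | nil => simp
    | cons v vs ih =>
      intro acc
      simp only [List.foldl_cons, ih, List.mem_cons]
      by_cases hv : v ≤ target
      · rw [if_pos hv]
        rw [show ∀ y, (w ∈ PySem.Set.add (PySem.Set.add acc (v + n)) y) ↔ _ from
              fun y => PySem.Set.mem_add _ _ _, PySem.Set.mem_add]
        constructor
        · rintro (((hm | he) | he) | ⟨u, hu, hle, he⟩)
          · exact Or.inl hm
          · exact Or.inr ⟨v, Or.inl rfl, hv, Or.inl he⟩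
          · exact Or.inr ⟨v, Or.inl rfl, hv, Or.inr he⟩
          · exact Or.inr ⟨u, Or.inr hu, hle, he⟩
        · rintro (hm | ⟨u, (rfl | hu), hle, he⟩)
          · exact Or.inl (Or.inl (Or.inl hm))
          · rcases he with rfl | rfl
            · exact Or.inl (Or.inl (Or.inr rfl))
            · exact Or.inl (Or.inr rfl)
          · exact Or.inr ⟨u, hu, hle, he⟩
      · rw [if_neg hv]
        constructor
        · rintro (hm | ⟨u, hu, hle, he⟩)
          · exact Or.inl hm
          · exact Or.inr ⟨u, Or.inr hu, hle, he⟩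
        · rintro (hm | ⟨u, (rfl | hu), hle, he⟩)
          · exact Or.inl hm
          · exact absurd hle hv
          · exact Or.inr ⟨u, hu, hle, he⟩
  rw [key]
  simp [PySem.Set.empty]

-- main bridge: the target is reachable from some seed in s iff A's counter is positive there
theorem reach_iff_validA_pos (target : Int) : ∀ (rest : List Int) (s : PySem.Set Int),
    target ∈ rest.foldl (fun r n => pvStep target n r) s ↔
      ∃ v ∈ s, 0 < pvValidA target v rest 0 := by
  intro rest
  induction rest with
  | nil =>
    intro s
    simp only [List.foldl_nil]
    constructor
    · intro h; exact ⟨target, h, by rw [pvValidA_nil, if_pos rfl]; omega⟩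
    · rintro ⟨v, hv, hpos⟩
      rw [pvValidA_nil] at hpos
      split_ifs at hpos with h1
      · exact h1 ▸ hv
      · omega
  | cons n rest ih =>
    intro s
    simp only [List.foldl_cons, ih]
    constructor
    · rintro ⟨w, hw, hpos⟩
      rcases (mem_pvStep target n w s).1 hw with ⟨v, hv, hle, he⟩
      refine ⟨v, hv, ?_⟩
      rw [pvValidA_cons, if_neg (by omega)]
      have ha := pvValidA_nonneg target rest (v + n)
      have hm := pvValidA_nonneg target rest (v * n)
      rcases he with rfl | rfl <;> omega
    · rintro ⟨v, hv, hpos⟩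
      rw [pvValidA_cons] at hpos
      split_ifs at hpos with h1
      · omega
      · have hle : v ≤ target := by omega
        have ha := pvValidA_nonneg target rest (v + n)
        have hm := pvValidA_nonneg target rest (v * n)
        by_cases hp : 0 < pvValidA target (v + n) rest 0
        · exact ⟨v + n, (mem_pvStep target n _ s).2 ⟨v, hv, hle, Or.inl rfl⟩, hp⟩
        · exact ⟨v * n, (mem_pvStep target n _ s).2 ⟨v, hv, hle, Or.inr rfl⟩, by omega⟩

-- the per-equation steps of the two folds agree on equations with a nonempty number list
theorem step_eq (e : Int × List Int) (he : e.2 ≠ []) (acc : Int) :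
    (match e.2 with
     | [] => acc
     | h :: rest => if pvValidA e.1 h rest 0 ≠ 0 then acc + e.1 else acc) =
    (match e.2 with
     | [] => acc
     | h :: rest =>
       let reach := rest.foldl (fun r n => pvStep e.1 n r) (PySem.Set.ofList [h])
       if PySem.Set.contains reach e.1 then acc + e.1 else acc) := by
  obtain ⟨t, nums⟩ := e
  match nums with
  | [] => exact absurd rfl he
  | h :: rest =>
    simp only
    have hiff : (pvValidA t h rest 0 ≠ 0) ↔
        PySem.Set.contains (rest.foldl (fun r n => pvStep t n r) (PySem.Set.ofList [h])) t = true := by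
      rw [PySem.Set.contains_iff, reach_iff_validA_pos]
      have hn := pvValidA_nonneg t rest h
      constructor
      · intro hne; exact ⟨h, by simp [PySem.Set.ofList], by omega⟩
      · rintro ⟨v, hv, hpos⟩
        simp [PySem.Set.ofList, PySem.Set.add, PySem.Set.empty] at hv
        subst hv; omega
    by_cases hc : pvValidA t h rest 0 ≠ 0
    · rw [if_pos hc, if_pos (hiff.1 hc)]
    · rw [if_neg hc, if_neg (fun hb => hc (hiff.2 hb))]

-- ===== VERDICT (by name: the statement is the Claim_ definition above) =====
theorem count_valid_operator_configurations_spec : Claim_equal_count_valid_operator_configurations := by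
  intro equations _ hpre
  unfold Spec_count_valid_operator_configurations
  unfold count_valid_operator_configurations count_valid_operator_configurations_alt
  have main : ∀ (l : List (Int × List Int)), (∀ e ∈ l, e.2 ≠ []) → ∀ acc : Int,
      l.foldl (fun acc eq =>
        match eq.2 with
        | [] => acc
        | h :: rest => if pvValidA eq.1 h rest 0 ≠ 0 then acc + eq.1 else acc) acc =
      l.foldl (fun total eq =>
        match eq.2 with
        | [] => total
        | h :: rest =>
          let reach := rest.foldl (fun r n => pvStep eq.1 n r) (PySem.Set.ofList [h])
          if PySem.Set.contains reach eq.1 then total + eq.1 else total) acc := by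
    intro l
    induction l with
    | nil => intro _ _; rfl
    | cons e tl ih =>
      intro hp acc
      simp only [List.foldl_cons]
      rw [step_eq e (hp e (by simp)) acc]
      exact ih (fun x hx => hp x (by simp [hx])) _
  exact main equations hpre 0
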